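-- pv_equiv track=rewrite | github.com/pypi-data/pypi-mirror-392 | packages/whai/whai-0.8.2.tar.gz/whai-0.8.2/whai/context/normalization.py | normalize_powershell_transcript
-- ===== SOURCE A (Python) =====
-- def normalize_powershell_transcript(text: str) -> str:
--     """Normalize PowerShell transcript while preserving useful metadata."""
--     lines = text.splitlines()
--     cleaned: list[str] = []
--     in_metadata_block = False
--     metadata: dict[str, str] = {}
--
--     i = 0
--     while i < len(lines):
--         line = lines[i]
--
--         if line.strip().startswith("**********************"):
--             if not in_metadata_block:
--                 in_metadata_block = True
--             else:
--                 if metadata: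
--                     cleaned.append("--- PowerShell Session ---")
--                     for key, value in metadata.items():
--                         cleaned.append(f"{key}: {value}")
--                     cleaned.append("---")
--                     metadata = {}
--                 in_metadata_block = False
--             i += 1
--             continue
--
--         if in_metadata_block:
--             if line.startswith("PowerShell transcript start"):
--                 metadata["Session"] = "PowerShell transcript"
--             elif line.startswith("Start time:"):
--                 metadata["Start time"] = line.replace("Start time:", "").strip()
--             elif line.startswith("Username:"):
--                 metadata["Username"] = line.replace("Username:", "").strip()
--             elif line.startswith("RunAs User:"):
--                 metadata["RunAs User"] = line.replace("RunAs User:", "").strip()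
--             elif line.startswith("Machine:"):
--                 metadata["Machine"] = line.replace("Machine:", "").strip()
--             elif line.startswith("OS:"):
--                 metadata["OS"] = line.replace("OS:", "").strip()
--             elif line.startswith("PSVersion:"):
--                 metadata["PSVersion"] = line.replace("PSVersion:", "").strip()
--             i += 1
--             continue
--
--         if line.startswith("Command start time:"):
--             timestamp = line.replace("Command start time:", "").strip()
--             cleaned.append(f"[Command timestamp: {timestamp}]")
--             i += 1
--             continue
--
--         if line.startswith(">> "):
--             i += 1
--             continue
--
--         cleaned.append(line)
--         i += 1
--
--     if in_metadata_block and metadata: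
--         cleaned.append("--- PowerShell Session ---")
--         for key, value in metadata.items():
--             cleaned.append(f"{key}: {value}")
--         cleaned.append("---")
--
--     return "\n".join(cleaned).strip()
-- ===== SOURCE B (Python) =====
-- def normalize_powershell_transcript(text: str) -> str:
--     """Normalize PowerShell transcript: split lines on banner delimiters, render segments by parity."""
--
--     def is_banner(line):
--         return line.strip().startswith("**********************")
--
--     def meta_step(md, line):
--         if line.startswith("PowerShell transcript start"):
--             md["Session"] = "PowerShell transcript"
--         elif line.startswith("Start time:"):
--             md["Start time"] = line.replace("Start time:", "").strip()
--         elif line.startswith("Username:"):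
--             md["Username"] = line.replace("Username:", "").strip()
--         elif line.startswith("RunAs User:"):
--             md["RunAs User"] = line.replace("RunAs User:", "").strip()
--         elif line.startswith("Machine:"):
--             md["Machine"] = line.replace("Machine:", "").strip()
--         elif line.startswith("OS:"):
--             md["OS"] = line.replace("OS:", "").strip()
--         elif line.startswith("PSVersion:"):
--             md["PSVersion"] = line.replace("PSVersion:", "").strip()
--         return md
--
--     def content_lines(line):
--         if line.startswith("Command start time:"):
--             return ["[Command timestamp: " + line.replace("Command start time:", "").strip() + "]"]
--         if line.startswith(">> "):
--             return []
--         return [line]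
--
--     def meta_block(seg):
--         md = {}
--         for line in seg:
--             md = meta_step(md, line)
--         if not md:
--             return []
--         return ["--- PowerShell Session ---"] + [f"{k}: {v}" for k, v in md.items()] + ["---"]
--
--     segments = []
--     cur = []
--     for line in text.splitlines():
--         if is_banner(line):
--             segments.append(cur)
--             cur = []
--         else:
--             cur.append(line)
--     segments.append(cur)
--
--     out = []
--     for idx, seg in enumerate(segments):
--         if idx % 2 == 1:
--             out.extend(meta_block(seg))
--         else:
--             out.extend(ln for line in seg for ln in content_lines(line))
--     return "\n".join(out).strip()
-- ===== Notes on version B (the rewrite author's own statement) =====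
-- stated objective: alternative
-- what changed: B replaces A's single stateful while-loop (in_metadata_block flag toggled by banner lines) with a two-phase decomposition: first split the lines into segments delimited by banner lines, then render each segment by its parity (even = content lines, odd = metadata block folded into an ordered dict and flushed).
import Mathlib
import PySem

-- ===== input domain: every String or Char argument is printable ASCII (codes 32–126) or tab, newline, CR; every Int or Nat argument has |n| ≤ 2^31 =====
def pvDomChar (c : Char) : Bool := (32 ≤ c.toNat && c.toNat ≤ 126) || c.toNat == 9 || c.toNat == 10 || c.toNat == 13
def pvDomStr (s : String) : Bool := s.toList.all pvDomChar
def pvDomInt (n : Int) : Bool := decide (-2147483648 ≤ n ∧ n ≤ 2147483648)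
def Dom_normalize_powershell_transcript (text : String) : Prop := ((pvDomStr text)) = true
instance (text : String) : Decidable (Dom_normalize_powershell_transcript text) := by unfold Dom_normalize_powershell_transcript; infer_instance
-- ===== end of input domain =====

-- B re-organizes A's stateful line loop as: split on banner lines, then render segments by parity (alternative decomposition, same cost).

-- ===== PORT A =====
-- shared with port B: the banner test and the metadata elif-chain, literally identical code in both Pythons
def pvIsBanner (line : String) : Bool :=
  PySem.Str.startswith (PySem.Str.strip line) "**********************"

def pvMetaStep (md : PySem.Dict String String) (line : String) : PySem.Dict String String :=
  if PySem.Str.startswith line "PowerShell transcript start" then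
    md.insert "Session" "PowerShell transcript"
  else if PySem.Str.startswith line "Start time:" then
    md.insert "Start time" (PySem.Str.strip (PySem.Str.replace line "Start time:" ""))
  else if PySem.Str.startswith line "Username:" then
    md.insert "Username" (PySem.Str.strip (PySem.Str.replace line "Username:" ""))
  else if PySem.Str.startswith line "RunAs User:" then
    md.insert "RunAs User" (PySem.Str.strip (PySem.Str.replace line "RunAs User:" ""))
  else if PySem.Str.startswith line "Machine:" then
    md.insert "Machine" (PySem.Str.strip (PySem.Str.replace line "Machine:" ""))
  else if PySem.Str.startswith line "OS:" then
    md.insert "OS" (PySem.Str.strip (PySem.Str.replace line "OS:" ""))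
  else if PySem.Str.startswith line "PSVersion:" then
    md.insert "PSVersion" (PySem.Str.strip (PySem.Str.replace line "PSVersion:" ""))
  else md

-- A's flush: append header, one line per item (for-loop), closing "---"
def pvFlushA (md : PySem.Dict String String) (cleaned : List String) : List String :=
  let cleaned := cleaned ++ ["--- PowerShell Session ---"]
  let cleaned := md.items.foldl (fun c kv => c ++ [kv.1 ++ ": " ++ kv.2]) cleaned
  cleaned ++ ["---"]

-- A's while-loop over lines, state (in_metadata_block, metadata, cleaned)
def pvLoopA : List String → Bool → PySem.Dict String String → List String → List String
  | [], inb, md, cleaned =>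
      if inb && !md.items.isEmpty then pvFlushA md cleaned else cleaned
  | line :: rest, inb, md, cleaned =>
      if pvIsBanner line then
        if !inb then pvLoopA rest true md cleaned
        else if !md.items.isEmpty then pvLoopA rest false PySem.Dict.empty (pvFlushA md cleaned)
        else pvLoopA rest false md cleaned
      else if inb then pvLoopA rest true (pvMetaStep md line) cleaned
      else if PySem.Str.startswith line "Command start time:" then
        pvLoopA rest inb md (cleaned ++ ["[Command timestamp: " ++ PySem.Str.strip (PySem.Str.replace line "Command start time:" "") ++ "]"])
      else if PySem.Str.startswith line ">> " then pvLoopA rest inb md cleaned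
      else pvLoopA rest inb md (cleaned ++ [line])

def normalize_powershell_transcript (text : String) : String :=
  PySem.Str.strip (PySem.Str.join "\n" (pvLoopA (PySem.Str.splitlines text) false PySem.Dict.empty []))

-- ===== PORT B =====
-- phase 1: split the lines on banner lines into segments
def pvSplitSegs : List String → List String → List (List String)
  | [], cur => [cur]
  | l :: ls, cur => if pvIsBanner l then cur :: pvSplitSegs ls [] else pvSplitSegs ls (cur ++ [l])

def pvContentLines (line : String) : List String :=
  if PySem.Str.startswith line "Command start time:" then
    ["[Command timestamp: " ++ PySem.Str.strip (PySem.Str.replace line "Command start time:" "") ++ "]"]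
  else if PySem.Str.startswith line ">> " then []
  else [line]

def pvMetaBlock (seg : List String) : List String :=
  let md := seg.foldl pvMetaStep PySem.Dict.empty
  if md.items.isEmpty then []
  else "--- PowerShell Session ---" :: (md.items.map (fun kv => kv.1 ++ ": " ++ kv.2) ++ ["---"])

-- phase 2: render the segments by parity (false = content segment, true = metadata segment)
def pvProcSegs : Bool → List (List String) → List String
  | _, [] => []
  | false, s :: rest => s.flatMap pvContentLines ++ pvProcSegs true rest
  | true, s :: rest => pvMetaBlock s ++ pvProcSegs false rest

def normalize_powershell_transcript_alt (text : String) : String :=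
  PySem.Str.strip (PySem.Str.join "\n" (pvProcSegs false (pvSplitSegs (PySem.Str.splitlines text) [])))

-- ===== PRECONDITION & SPEC =====
def Spec_normalize_powershell_transcript (text : String) (out : String) : Prop := out = normalize_powershell_transcript_alt text
instance (text : String) (out : String) : Decidable (Spec_normalize_powershell_transcript text out) := by unfold Spec_normalize_powershell_transcript; infer_instance

-- ===== CLAIM (what is proved, stated in full; the proofs are below) =====
def Claim_equal_normalize_powershell_transcript : Prop := ∀ (text : String), Dom_normalize_powershell_transcript text → Spec_normalize_powershell_transcript text (normalize_powershell_transcript text)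

-- ===== LEMMAS AND PROOFS =====

lemma pvFlushA_eq (md : PySem.Dict String String) (c : List String) :
    pvFlushA md c = c ++ ("--- PowerShell Session ---" :: (md.items.map (fun kv => kv.1 ++ ": " ++ kv.2) ++ ["---"])) := by
  simp only [pvFlushA]
  rw [PySem.List.foldl_append_singleton_eq_map]
  simp

lemma pvLoopA_acc (ls : List String) : ∀ (inb : Bool) (md : PySem.Dict String String) (c : List String),
    pvLoopA ls inb md c = c ++ pvLoopA ls inb md [] := by
  induction ls with
  | nil =>
    intro inb md c
    simp only [pvLoopA]
    split_ifs with h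
    · rw [pvFlushA_eq, pvFlushA_eq]; simp
    · simp
  | cons l ls ih =>
    intro inb md c
    simp only [pvLoopA]
    split_ifs with h1 h2 h3 h4 h5 h6 <;>
      (conv_lhs => rw [ih]) <;> (conv_rhs => rw [ih]) <;> simp [pvFlushA_eq]

lemma pv_empty_of_items_nil (md : PySem.Dict String String) (h : md.items = []) :
    md = PySem.Dict.empty := by
  apply PySem.Dict.ext; simp [h, PySem.Dict.empty]

lemma pv_main (ls : List String) : ∀ cur : List String,
    pvProcSegs false (pvSplitSegs ls cur)
      = cur.flatMap pvContentLines ++ pvLoopA ls false PySem.Dict.empty []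
    ∧ pvProcSegs true (pvSplitSegs ls cur)
      = pvLoopA ls true (cur.foldl pvMetaStep PySem.Dict.empty) [] := by
  induction ls with
  | nil =>
    intro cur
    constructor
    · simp [pvSplitSegs, pvProcSegs, pvLoopA]
    · simp only [pvSplitSegs, pvProcSegs, pvMetaBlock, pvLoopA, List.append_nil, Bool.true_and]
      by_cases h : (List.foldl pvMetaStep PySem.Dict.empty cur).items.isEmpty
      · simp [h]
      · simp [h, pvFlushA_eq]
  | cons l ls ih =>
    intro cur
    by_cases hb : pvIsBanner l
    · constructor
      · simp only [pvSplitSegs, hb, if_true, pvProcSegs, pvLoopA, Bool.not_false, List.nil_append]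
        rw [(ih []).2]
        rfl
      · simp only [pvSplitSegs, hb, if_true, pvProcSegs, pvLoopA, Bool.not_true, Bool.false_eq_true,
          if_false]
        rw [(ih []).1]
        simp only [pvMetaBlock, List.flatMap_nil, List.nil_append]
        by_cases hmd : (List.foldl pvMetaStep PySem.Dict.empty cur).items.isEmpty
        · rw [if_pos hmd, if_neg (by simp [hmd])]
          rw [pv_empty_of_items_nil (List.foldl pvMetaStep PySem.Dict.empty cur) (by simpa using hmd)]
          simp
        · rw [if_neg hmd, if_pos (by simp [hmd])]
          conv_rhs => rw [pvLoopA_acc]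
          rw [pvFlushA_eq]
          simp
    · constructor
      · simp only [pvSplitSegs, hb, Bool.false_eq_true, if_false, pvLoopA]
        rw [(ih (cur ++ [l])).1]
        simp only [List.flatMap_append, List.flatMap_cons, List.flatMap_nil, List.append_nil,
          List.append_assoc]
        congr 1
        by_cases h1 : PySem.Str.startswith l "Command start time:"
        · rw [if_pos h1]
          conv_rhs => rw [pvLoopA_acc]
          simp only [pvContentLines]
          rw [if_pos h1]
          simp
        · rw [if_neg h1]
          by_cases h2 : PySem.Str.startswith l ">> "
          · rw [if_pos h2]
            simp only [pvContentLines]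
            rw [if_neg h1, if_pos h2]
            simp
          · rw [if_neg h2]
            conv_rhs => rw [pvLoopA_acc]
            simp only [pvContentLines]
            rw [if_neg h1, if_neg h2]
            simp
      · simp only [pvSplitSegs, hb, Bool.false_eq_true, if_false, pvLoopA, if_true]
        rw [(ih (cur ++ [l])).2]
        simp

-- ===== VERDICT (by name: the statement is the Claim_ definition above) =====
theorem normalize_powershell_transcript_spec : Claim_equal_normalize_powershell_transcript := by
  intro text _
  unfold Spec_normalize_powershell_transcript normalize_powershell_transcript normalize_powershell_transcript_alt
  rw [(pv_main (PySem.Str.splitlines text) []).1]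
  simp
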